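-- pv_equiv track=rewrite | github.com/alphabet-al/AOC | 2024/day_14/main.py | quadrant_count
-- ===== SOURCE A (Python) =====
-- def quadrant_count(m, grid):
--     x,y = grid
--     mid_x, mid_y = x//2, y//2
--     q1 = q2 = q3 = q4 = 0
--
--     # q1 | q2
--     # -------
--     # q3 | q4
--
--     for pos,vel in m.values():
--         rx, ry = pos
--         if rx < mid_x and ry < mid_y:
--             q1 += 1
--         elif rx > mid_x and ry < mid_y:
--             q2 += 1
--         elif rx < mid_x and ry > mid_y:
--             q3 += 1
--         elif rx > mid_x and ry > mid_y:
--             q4 += 1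
--
--     return q1 * q2 * q3 * q4
-- ===== SOURCE B (Python) =====
-- def quadrant_count(m, grid):
--     mid_x, mid_y = grid[0] // 2, grid[1] // 2
--     product = 1
--     for sx in (-1, 1):
--         for sy in (-1, 1):
--             product *= sum(1 for (rx, ry), _vel in m.values()
--                            if (rx - mid_x) * sx > 0 and (ry - mid_y) * sy > 0)
--     return product
-- ===== Notes on version B (the rewrite author's own statement) =====
-- stated objective: alternative
-- what changed: Instead of one pass with four scalar counters and an elif cascade, B makes four staged counting passes, one per quadrant sign pair (sx, sy), counting robots with (rx-mid_x)*sx > 0 and (ry-mid_y)*sy > 0, and multiplies the counts as it goes.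
import Mathlib
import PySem

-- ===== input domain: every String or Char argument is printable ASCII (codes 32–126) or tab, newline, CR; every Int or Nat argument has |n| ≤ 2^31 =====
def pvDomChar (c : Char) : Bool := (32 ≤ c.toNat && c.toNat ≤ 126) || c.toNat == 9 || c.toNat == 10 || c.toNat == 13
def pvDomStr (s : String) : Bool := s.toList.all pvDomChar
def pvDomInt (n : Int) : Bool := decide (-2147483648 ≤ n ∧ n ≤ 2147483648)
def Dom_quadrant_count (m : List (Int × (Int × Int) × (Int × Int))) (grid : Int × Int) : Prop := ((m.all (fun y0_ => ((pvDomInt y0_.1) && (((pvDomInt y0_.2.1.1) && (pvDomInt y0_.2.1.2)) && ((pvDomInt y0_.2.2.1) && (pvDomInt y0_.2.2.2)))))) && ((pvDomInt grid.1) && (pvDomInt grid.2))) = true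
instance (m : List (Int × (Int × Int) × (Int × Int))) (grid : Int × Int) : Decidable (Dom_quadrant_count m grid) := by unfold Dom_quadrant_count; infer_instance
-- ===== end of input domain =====

-- B replaces A's single pass with four counters + elif cascade by four staged counting passes, one per quadrant sign pair, multiplied; same O(n).


-- ===== PORT A =====
-- A's loop body: the elif cascade over four scalar counters (q1,q2,q3,q4)
def qcStepA (mx my : Int) (q : Int × Int × Int × Int) (pv : (Int × Int) × (Int × Int)) : Int × Int × Int × Int :=
  let rx := pv.1.1
  let ry := pv.1.2
  if rx < mx ∧ ry < my then (q.1 + 1, q.2.1, q.2.2.1, q.2.2.2)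
  else if rx > mx ∧ ry < my then (q.1, q.2.1 + 1, q.2.2.1, q.2.2.2)
  else if rx < mx ∧ ry > my then (q.1, q.2.1, q.2.2.1 + 1, q.2.2.2)
  else if rx > mx ∧ ry > my then (q.1, q.2.1, q.2.2.1, q.2.2.2 + 1)
  else q

def quadrant_count (m : List (Int × (Int × Int) × (Int × Int))) (grid : Int × Int) : Int :=
  let mx := PySem.Int.floordiv grid.1 2
  let my := PySem.Int.floordiv grid.2 2
  let q := (PySem.Dict.ofList m).values.foldl (qcStepA mx my) (0, 0, 0, 0)
  q.1 * q.2.1 * q.2.2.1 * q.2.2.2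

-- ===== PORT B =====
-- B's inner generator: sum(1 for (rx,ry),_ in m.values() if (rx-mid_x)*sx > 0 and (ry-mid_y)*sy > 0)
def qcPass (mx my sx sy : Int) (vals : List ((Int × Int) × (Int × Int))) : Int :=
  vals.foldl (fun acc pv => if (pv.1.1 - mx) * sx > 0 ∧ (pv.1.2 - my) * sy > 0 then acc + 1 else acc) 0

def quadrant_count_alt (m : List (Int × (Int × Int) × (Int × Int))) (grid : Int × Int) : Int :=
  let mx := PySem.Int.floordiv grid.1 2
  let my := PySem.Int.floordiv grid.2 2
  let vals := (PySem.Dict.ofList m).values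
  -- sx outer loop over (-1, 1), sy inner loop over (-1, 1)
  [((-1 : Int), (-1 : Int)), (-1, 1), (1, -1), (1, 1)].foldl
    (fun product s => product * qcPass mx my s.1 s.2 vals) 1

-- ===== PRECONDITION & SPEC =====
def Spec_quadrant_count (m : List (Int × (Int × Int) × (Int × Int))) (grid : Int × Int) (out : Int) : Prop := out = quadrant_count_alt m grid
instance (m : List (Int × (Int × Int) × (Int × Int))) (grid : Int × Int) (out : Int) : Decidable (Spec_quadrant_count m grid out) := by unfold Spec_quadrant_count; infer_instance

-- ===== CLAIM (what is proved, stated in full; the proofs are below) =====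
def Claim_equal_quadrant_count : Prop := ∀ (m : List (Int × (Int × Int) × (Int × Int))) (grid : Int × Int), Dom_quadrant_count m grid → Spec_quadrant_count m grid (quadrant_count m grid)

-- ===== LEMMAS AND PROOFS =====

-- B's midline-shifted sign test equals A's strict comparison, elementwise.
theorem qcCond_neg_neg (mx my : Int) (pv : (Int × Int) × (Int × Int)) :
    ((pv.1.1 - mx) * (-1) > 0 ∧ (pv.1.2 - my) * (-1) > 0) ↔ (pv.1.1 < mx ∧ pv.1.2 < my) := by
  constructor <;> intro h <;> exact ⟨by omega, by omega⟩

theorem qcCond_pos_neg (mx my : Int) (pv : (Int × Int) × (Int × Int)) :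
    ((pv.1.1 - mx) * 1 > 0 ∧ (pv.1.2 - my) * (-1) > 0) ↔ (pv.1.1 > mx ∧ pv.1.2 < my) := by
  constructor <;> intro h <;> exact ⟨by omega, by omega⟩

theorem qcCond_neg_pos (mx my : Int) (pv : (Int × Int) × (Int × Int)) :
    ((pv.1.1 - mx) * (-1) > 0 ∧ (pv.1.2 - my) * 1 > 0) ↔ (pv.1.1 < mx ∧ pv.1.2 > my) := by
  constructor <;> intro h <;> exact ⟨by omega, by omega⟩

theorem qcCond_pos_pos (mx my : Int) (pv : (Int × Int) × (Int × Int)) :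
    ((pv.1.1 - mx) * 1 > 0 ∧ (pv.1.2 - my) * 1 > 0) ↔ (pv.1.1 > mx ∧ pv.1.2 > my) := by
  constructor <;> intro h <;> exact ⟨by omega, by omega⟩

-- Each of B's counting passes is a countP of the corresponding strict-quadrant predicate.
theorem qcPass_eq_countP (mx my sx sy : Int) (vals : List ((Int × Int) × (Int × Int))) :
    qcPass mx my sx sy vals
      = (vals.countP (fun pv => decide ((pv.1.1 - mx) * sx > 0 ∧ (pv.1.2 - my) * sy > 0)) : Int) := by
  simp [qcPass, PySem.List.foldl_ite_add_one]

-- A's fold computes exactly the four per-quadrant counts, shifted by the start tuple.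
theorem qcA_counts (mx my : Int) (vals : List ((Int × Int) × (Int × Int))) :
    ∀ q : Int × Int × Int × Int,
      vals.foldl (qcStepA mx my) q
        = (q.1 + (vals.countP (fun pv => decide (pv.1.1 < mx ∧ pv.1.2 < my)) : Int),
           q.2.1 + (vals.countP (fun pv => decide (pv.1.1 > mx ∧ pv.1.2 < my)) : Int),
           q.2.2.1 + (vals.countP (fun pv => decide (pv.1.1 < mx ∧ pv.1.2 > my)) : Int),
           q.2.2.2 + (vals.countP (fun pv => decide (pv.1.1 > mx ∧ pv.1.2 > my)) : Int)) := by
  induction vals with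
  | nil => intro q; simp
  | cons pv rest ih =>
    intro q
    simp only [List.foldl_cons, ih, List.countP_cons]
    rcases lt_trichotomy pv.1.1 mx with hx | hx | hx <;>
      rcases lt_trichotomy pv.1.2 my with hy | hy | hy <;>
      simp [qcStepA, hx, hy, not_lt_of_gt] <;>
      ring

-- ===== VERDICT (by name: the statement is the Claim_ definition above) =====
theorem quadrant_count_spec : Claim_equal_quadrant_count := by
  intro m grid _
  show quadrant_count m grid = quadrant_count_alt m grid
  unfold quadrant_count quadrant_count_alt
  simp only [List.foldl_cons, List.foldl_nil, qcPass_eq_countP,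
    qcA_counts (PySem.Int.floordiv grid.1 2) (PySem.Int.floordiv grid.2 2)
      (PySem.Dict.ofList m).values (0, 0, 0, 0)]
  simp only [qcCond_neg_neg, qcCond_pos_neg, qcCond_neg_pos, qcCond_pos_pos]
  ring
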